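-- pv_equiv track=rewrite | github.com/intel/mlir-extensions | test.py | range_loop
-- ===== SOURCE A (Python) =====
-- def range_loop(n):
--     res = 0
--     res1 = 2
--     for i in range(n):
--         if i > 5:
--             res = res + i
--         else:
--             res1 = res1 + i * 2
--     return res + res1
-- ===== SOURCE B (Python) =====
-- def range_loop(n):
--     m = min(max(n, 0), 6)
--     total = 2 + m * (m - 1)
--     if n > 6:
--         total += n * (n - 1) // 2 - 15
--     return total
-- ===== Notes on version B (the rewrite author's own statement) =====
-- stated objective: faster
-- what changed: Replaced the O(n) accumulation loop with O(1) closed-form arithmetic-series sums split at the threshold of six.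
import Mathlib
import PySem

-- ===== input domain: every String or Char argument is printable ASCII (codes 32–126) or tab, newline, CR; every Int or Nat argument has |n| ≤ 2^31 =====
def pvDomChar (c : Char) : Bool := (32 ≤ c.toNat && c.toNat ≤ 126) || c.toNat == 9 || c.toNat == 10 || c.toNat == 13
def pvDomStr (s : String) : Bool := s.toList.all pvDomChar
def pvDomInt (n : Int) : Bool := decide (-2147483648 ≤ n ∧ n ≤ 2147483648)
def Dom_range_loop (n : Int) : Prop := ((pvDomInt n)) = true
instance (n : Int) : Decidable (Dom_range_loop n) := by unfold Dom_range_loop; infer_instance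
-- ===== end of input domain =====

-- B replaces the O(n) accumulation loop with O(1) closed-form arithmetic-series sums split at the threshold (objective: faster, asymptotic).

-- ===== PORT A =====
def range_loop (n : Int) : Int :=
  let p := (PySem.List.pyRange 0 n 1).foldl
    (fun (p : Int × Int) i => if i > 5 then (p.1 + i, p.2) else (p.1, p.2 + i * 2)) (0, 2)
  p.1 + p.2

-- ===== PORT B =====
def range_loop_alt (n : Int) : Int :=
  let m := min (max n 0) 6
  let total := 2 + m * (m - 1)
  if n > 6 then total + (PySem.Int.floordiv (n * (n - 1)) 2 - 15) else total

-- ===== PRECONDITION & SPEC =====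
def Spec_range_loop (n : Int) (out : Int) : Prop := out = range_loop_alt n
instance (n : Int) (out : Int) : Decidable (Spec_range_loop n out) := by unfold Spec_range_loop; infer_instance

-- ===== CLAIM (what is proved, stated in full; the proofs are below) =====
def Claim_equal_range_loop : Prop := ∀ (n : Int), Dom_range_loop n → Spec_range_loop n (range_loop n)

-- ===== LEMMAS AND PROOFS =====

-- closed form of the loop state after running over range(0, k)
lemma range_loop_foldl_closed (k : Nat) :
    (PySem.List.pyRange 0 (k : Int) 1).foldl
      (fun (p : Int × Int) i => if i > 5 then (p.1 + i, p.2) else (p.1, p.2 + i * 2)) (0, 2)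
    = ((if 6 < (k : Int) then ((k : Int) * ((k : Int) - 1)) / 2 - 15 else 0),
       2 + (min (k : Int) 6) * (min (k : Int) 6 - 1)) := by
  induction k with
  | zero => simp [PySem.List.pyRange_one_eq_nil]
  | succ k ih =>
    have hsplit : PySem.List.pyRange 0 ((k : Int) + 1) 1
        = PySem.List.pyRange 0 (k : Int) 1 ++ [(k : Int)] :=
      PySem.List.pyRange_one_succ_right (by positivity)
    push_cast
    rw [hsplit, List.foldl_append, ih]
    simp only [List.foldl_cons, List.foldl_nil]
    rcases le_or_gt ((k : Int)) 5 with h | h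
    · have h5 : ¬ ((k : Int) > 5) := by omega
      have h6 : ¬ (6 < (k : Int)) := by omega
      have h6' : ¬ (6 < (k : Int) + 1) := by omega
      have hm : min (k : Int) 6 = (k : Int) := by omega
      have hm' : min ((k : Int) + 1) 6 = (k : Int) + 1 := by omega
      simp only [h5, h6, h6', hm, hm', if_false]
      rw [Prod.mk.injEq]; exact ⟨rfl, by ring⟩
    · have h5 : (k : Int) > 5 := h
      have hm : min (k : Int) 6 = 6 := by omega
      have hm' : min ((k : Int) + 1) 6 = 6 := by omega
      have h6' : 6 < (k : Int) + 1 := by omega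
      simp only [if_pos h5, hm, hm', if_pos h6']
      rw [Prod.mk.injEq]; refine ⟨?_, by ring⟩
      rcases eq_or_lt_of_le (show (6:Int) ≤ (k:Int) by omega) with h6eq | h6lt
    -- k = 6 base of the upper branch, or genuine division step
      · rw [← h6eq]; norm_num
      · have h6 : 6 < (k : Int) := h6lt
        rw [if_pos h6]
        have : ((k : Int) + 1) * ((k : Int) + 1 - 1) = (k : Int) * ((k : Int) - 1) + 2 * (k : Int) := by ring
        rw [this, Int.add_mul_ediv_left _ _ (by norm_num : (2 : Int) ≠ 0)]
        ring

-- ===== VERDICT (by name: the statement is the Claim_ definition above) =====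
theorem range_loop_spec : Claim_equal_range_loop := by
  intro n _
  unfold Spec_range_loop range_loop range_loop_alt
  rcases le_or_gt n 0 with hle | hpos
  · rw [PySem.List.pyRange_one_eq_nil hle]
    have hmax : max n 0 = 0 := by omega
    have h6 : ¬ (n > 6) := by omega
    simp [hmax, h6]
  · obtain ⟨k, hk⟩ : ∃ k : Nat, n = (k : Int) := ⟨n.toNat, (Int.toNat_of_nonneg hpos.le).symm⟩
    subst hk
    rw [range_loop_foldl_closed]
    have hmax : max (k : Int) 0 = (k : Int) := by omega
    rw [hmax]
    rcases le_or_gt ((k : Int)) 6 with h | h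
    · have h6 : ¬ ((k : Int) > 6) := by omega
      simp only [if_neg h6]
      ring
    · have hfd : PySem.Int.floordiv ((k : Int) * ((k : Int) - 1)) 2 = ((k : Int) * ((k : Int) - 1)) / 2 :=
        PySem.Int.floordiv_eq_ediv_of_pos (by norm_num)
      simp only [if_pos h, hfd]
      ring
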